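-- pv_equiv track=rewrite | github.com/chrisjdavie/hackerrank | datastructures/queues/down_to_zero/failed_top_down/all_two_factors.py | all_two_factors
-- ===== SOURCE A (Python) =====
-- from functools import reduce
-- from operator import mul
-- from itertools import product, compress
--
-- class TooFewError(ValueError):
--     pass
--
-- def all_two_factors(prime_factors):
--
--     if len(prime_factors) < 2:
--         raise TooFewError
--
--     factors = set()
--     for bools in product([True, False], repeat=len(prime_factors)):
--         if all(bools) or not(any(bools)):
--             continue
--
--         f0 = reduce(mul, list(compress(prime_factors, bools)))
--
--         not_bools = [ not x for x in bools ]
--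
--         f1 = reduce(mul, list(compress(prime_factors, not_bools)))
--
--         factors.add((min(f0, f1), max(f0, f1)))
--
--     return factors
-- ===== SOURCE B (Python) =====
-- class TooFewError(ValueError):
--     pass
--
-- def all_two_factors(prime_factors):
--     if len(prime_factors) < 2:
--         raise TooFewError
--     # incrementally maintain the distinct ordered (left-product, right-product)
--     # pairs of all proper nonempty splits of the prefix processed so far
--     P = prime_factors[0]
--     S = []
--     for x in prime_factors[1:]:
--         new = [(P, x)]
--         for (a, b) in S:
--             new.append((a * x, b))
--             new.append((a, b * x))
--         new.append((x, P))
--         S = list(dict.fromkeys(new))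
--         P *= x
--     return {(a, b) if a <= b else (b, a) for (a, b) in S}
-- ===== Notes on version B (the rewrite author's own statement) =====
-- stated objective: alternative
-- what changed: A re-enumerates all 2^n boolean subset masks and recomputes each side's product with reduce; B builds, in one left-to-right pass, the ordered DISTINCT (left-product, right-product) pairs of all proper splits of the growing prefix (doubling each pair plus an ordered dict dedup), so its work is proportional to the number of distinct split pairs (small for duplicate-heavy factor lists) instead of always 2^n*n.
import Mathlib
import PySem

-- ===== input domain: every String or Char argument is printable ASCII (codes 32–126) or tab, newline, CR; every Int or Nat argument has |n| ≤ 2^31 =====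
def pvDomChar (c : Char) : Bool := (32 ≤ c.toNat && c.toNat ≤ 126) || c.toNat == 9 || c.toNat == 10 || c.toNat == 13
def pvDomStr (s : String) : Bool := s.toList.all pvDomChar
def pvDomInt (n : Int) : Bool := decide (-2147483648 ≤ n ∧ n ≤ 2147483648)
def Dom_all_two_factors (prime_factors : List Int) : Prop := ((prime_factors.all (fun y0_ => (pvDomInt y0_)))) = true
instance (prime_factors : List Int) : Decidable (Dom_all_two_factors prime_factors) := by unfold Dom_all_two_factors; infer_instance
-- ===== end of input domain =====

-- B replaces A's exhaustive 2^n subset enumeration by an incremental, output-sensitive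
-- construction of the DISTINCT complementary split pairs of each prefix (doubling + ordered dedup).

-- ===== PORT A =====
-- reduce(mul, l): Python raises TypeError on []; A's guard makes that unreachable, the value 1 here is never used
def pyReduceMul : List Int → Int
  | [] => 1
  | x :: xs => xs.foldl (· * ·) x

-- itertools.compress(xs, bs)
def pyCompress (xs : List Int) (bs : List Bool) : List Int :=
  (xs.zip bs).filterMap (fun p => if p.2 then some p.1 else none)

-- itertools.product([True, False], repeat=n), in iteration order
def boolVecs : Nat → List (List Bool)
  | 0 => [[]]
  | n + 1 => (boolVecs n).map (fun v => true :: v) ++ (boolVecs n).map (fun v => false :: v)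

-- 'if len(prime_factors) < 2: raise TooFewError' is excluded by Pre_all_two_factors
def all_two_factors (prime_factors : List Int) : List (Int × Int) :=
  (boolVecs prime_factors.length).foldl
    (fun factors bools =>
      if bools.all id || !(bools.any id) then factors
      else
        let f0 := pyReduceMul (pyCompress prime_factors bools)
        let not_bools := bools.map (fun x => !x)
        let f1 := pyReduceMul (pyCompress prime_factors not_bools)
        PySem.Set.add factors (min f0 f1, max f0 f1))
    []

-- ===== PORT B =====
-- loop body of B: extend the distinct split pairs of the prefix by one more factor x
def twoFactorStep (st : List (Int × Int) × Int) (x : Int) : List (Int × Int) × Int :=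
  let news := (st.2, x) :: st.1.flatMap (fun p => [(p.1 * x, p.2), (p.1, p.2 * x)]) ++ [(x, st.2)]
  (PySem.Set.ofList news, st.2 * x)

-- 'if len(prime_factors) < 2: raise TooFewError' is excluded by Pre_all_two_factors
def all_two_factors_alt (prime_factors : List Int) : List (Int × Int) :=
  match prime_factors with
  | [] => []
  | x0 :: rest =>
    let st := rest.foldl twoFactorStep ([], x0)
    PySem.Set.ofList (st.1.map (fun p => (min p.1 p.2, max p.1 p.2)))

-- ===== PRECONDITION & SPEC =====
-- A raises TooFewError when len(prime_factors) < 2 (and so does B); only those inputs are excluded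
def Pre_all_two_factors (prime_factors : List Int) : Prop := 2 ≤ prime_factors.length
instance (prime_factors : List Int) : Decidable (Pre_all_two_factors prime_factors) := by unfold Pre_all_two_factors; infer_instance
def pvWitness_all_two_factors : List Int := [2, 3]
def Spec_all_two_factors (prime_factors : List Int) (out : List (Int × Int)) : Prop := out = all_two_factors_alt prime_factors
instance (prime_factors : List Int) (out : List (Int × Int)) : Decidable (Spec_all_two_factors prime_factors out) := by unfold Spec_all_two_factors; infer_instance

-- ===== CLAIM (what is proved, stated in full; the proofs are below) =====
def Claim_equal_all_two_factors : Prop := ∀ (prime_factors : List Int), Dom_all_two_factors prime_factors → Pre_all_two_factors prime_factors → Spec_all_two_factors prime_factors (all_two_factors prime_factors)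

-- ===== LEMMAS AND PROOFS =====

-- the (left product, right product) pairs of ALL 2^n splits of xs, in A's iteration order
def gseq : List Int → List (Int × Int)
  | [] => [(1, 1)]
  | x :: xs => (gseq xs).map (fun p => (x * p.1, p.2)) ++ (gseq xs).map (fun p => (p.1, x * p.2))

-- the split pairs of the proper nonempty subsets (A's unskipped iterations), in order
def intSeq (xs : List Int) : List (Int × Int) := ((gseq xs).drop 1).dropLast

-- the boolean vectors of boolVecs n other than all-True (first) and all-False (last)
def mids : Nat → List (List Bool)
  | 0 => []
  | 1 => []
  | n + 2 => (mids (n + 1)).map (fun v => true :: v)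
      ++ [true :: List.replicate (n + 1) false, false :: List.replicate (n + 1) true]
      ++ (mids (n + 1)).map (fun v => false :: v)

theorem foldl_mul_eq (xs : List Int) : ∀ x : Int, xs.foldl (· * ·) x = x * xs.prod := by
  induction xs with
  | nil => simp
  | cons y ys ih => intro x; simp [List.foldl_cons, ih, mul_assoc]

theorem pyReduceMul_eq_prod (l : List Int) : pyReduceMul l = l.prod := by
  cases l with
  | nil => simp [pyReduceMul]
  | cons x xs => simp [pyReduceMul, foldl_mul_eq]

theorem pyCompress_cons_true (x : Int) (xs : List Int) (bs : List Bool) :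
    pyCompress (x :: xs) (true :: bs) = x :: pyCompress xs bs := by
  simp [pyCompress]

theorem pyCompress_cons_false (x : Int) (xs : List Int) (bs : List Bool) :
    pyCompress (x :: xs) (false :: bs) = pyCompress xs bs := by
  simp [pyCompress]

theorem map_pairProd_boolVecs (pf : List Int) :
    (boolVecs pf.length).map
      (fun v => ((pyCompress pf v).prod, (pyCompress pf (v.map (fun b => !b))).prod)) = gseq pf := by
  induction pf with
  | nil => simp [boolVecs, gseq, pyCompress]
  | cons x t ih =>
    have h1 : (fun v => ((pyCompress (x :: t) v).prod, (pyCompress (x :: t) (v.map (fun b => !b))).prod)) ∘ (fun v => true :: v)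
        = (fun p => (x * p.1, p.2)) ∘ (fun v => ((pyCompress t v).prod, (pyCompress t (v.map (fun b => !b))).prod)) := by
      funext v
      simp [pyCompress_cons_true, pyCompress_cons_false]
    have h2 : (fun v => ((pyCompress (x :: t) v).prod, (pyCompress (x :: t) (v.map (fun b => !b))).prod)) ∘ (fun v => false :: v)
        = (fun p => (p.1, x * p.2)) ∘ (fun v => ((pyCompress t v).prod, (pyCompress t (v.map (fun b => !b))).prod)) := by
      funext v
      simp [pyCompress_cons_true, pyCompress_cons_false]
    show (boolVecs (t.length + 1)).map _ = _
    rw [boolVecs, List.map_append, List.map_map, List.map_map, h1, h2,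
      ← List.map_map, ← List.map_map, ih, gseq]

theorem boolVecs_decomp (n : Nat) :
    boolVecs (n + 1) = List.replicate (n + 1) true :: mids (n + 1) ++ [List.replicate (n + 1) false] := by
  induction n with
  | zero => decide
  | succ m ih =>
    show boolVecs (m + 2) = _
    rw [boolVecs, ih]
    simp [mids, List.replicate_succ]

theorem mids_no_skip (n : Nat) : ∀ v ∈ mids n, v.all id = false ∧ v.any id = true := by
  induction n with
  | zero => simp [mids]
  | succ m ih =>
    match m, ih with
    | 0, _ => simp [mids]
    | (k + 1), ih =>
      intro v hv
      rw [mids] at hv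
      rcases List.mem_append.mp hv with h12 | h3
      · rcases List.mem_append.mp h12 with h1 | h2
        · obtain ⟨w, hw, rfl⟩ := List.mem_map.mp h1
          have := ih w hw
          simp [List.all_cons, List.any_cons, this.1, this.2]
        · rcases (by simpa using h2 : v = true :: List.replicate (k + 1) false ∨
              v = false :: List.replicate (k + 1) true) with rfl | rfl
          · constructor
            · simp [List.all_cons, List.replicate_succ]
            · simp [List.any_cons]
          · constructor
            · simp [List.all_cons]
            · simp [List.any_cons, List.replicate_succ]
      · obtain ⟨w, hw, rfl⟩ := List.mem_map.mp h3
        have := ih w hw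
        simp [List.all_cons, List.any_cons, this.1, this.2]

theorem gseq_ne_nil (xs : List Int) : gseq xs ≠ [] := by
  cases xs with
  | nil => simp [gseq]
  | cons x t => simp [gseq, gseq_ne_nil t]

theorem gseq_length (xs : List Int) : (gseq xs).length = 2 ^ xs.length := by
  induction xs with
  | nil => simp [gseq]
  | cons x t ih => simp [gseq, ih]; ring

theorem gseq_head? (xs : List Int) : (gseq xs).head? = some (xs.prod, 1) := by
  induction xs with
  | nil => simp [gseq]
  | cons x t ih =>
    simp [gseq, List.head?_append, List.head?_map, ih]

theorem gseq_getLast? (xs : List Int) : (gseq xs).getLast? = some (1, xs.prod) := by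
  induction xs with
  | nil => simp [gseq]
  | cons x t ih =>
    simp [gseq, List.getLast?_append, List.getLast?_map, ih]

theorem list_decomp {α : Type} (l : List α) (a b : α) (hh : l.head? = some a)
    (hl : l.getLast? = some b) (hlen : 2 ≤ l.length) :
    l = a :: (l.drop 1).dropLast ++ [b] := by
  cases l with
  | nil => simp at hh
  | cons c t =>
    simp only [List.head?_cons, Option.some.injEq] at hh
    subst hh
    have ht : t ≠ [] := by
      cases t with
      | nil => simp at hlen
      | cons _ _ => simp
    have h2 : t.getLast? = some b := by
      cases ht2 : t.getLast? with
      | none => exact absurd (List.getLast?_eq_none_iff.mp ht2) ht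
      | some y =>
        rw [List.getLast?_cons, ht2] at hl
        simpa using hl
    have h3 : t = t.dropLast ++ [b] := by
      conv_lhs => rw [← List.dropLast_concat_getLast ht, List.getLast_of_mem_getLast? h2]
    simp only [List.drop_one, List.tail_cons]
    conv_lhs => rw [h3]
    simp

theorem gseq_decomp (xs : List Int) (h : xs ≠ []) :
    gseq xs = (xs.prod, 1) :: intSeq xs ++ [(1, xs.prod)] := by
  have hlen : 2 ≤ (gseq xs).length := by
    rw [gseq_length]
    have : 1 ≤ xs.length := by have := List.length_pos_iff.mpr h; omega
    calc 2 = 2 ^ 1 := rfl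
      _ ≤ 2 ^ xs.length := Nat.pow_le_pow_right (by omega) this
  exact list_decomp _ _ _ (gseq_head? xs) (gseq_getLast? xs) hlen

theorem gseq_snoc (xs : List Int) (x : Int) :
    gseq (xs ++ [x]) = (gseq xs).flatMap (fun p => [(p.1 * x, p.2), (p.1, p.2 * x)]) := by
  induction xs with
  | nil => simp [gseq]
  | cons y t ih =>
    show gseq (y :: (t ++ [x])) = _
    rw [gseq, ih, gseq]
    simp only [List.flatMap_append, List.map_flatMap, List.flatMap_map]
    congr 1
    · apply List.flatMap_congr
      intro p _
      simp [mul_comm, mul_left_comm]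
    · apply List.flatMap_congr
      intro p _
      simp [mul_comm, mul_left_comm]

theorem intSeq_snoc (xs : List Int) (x : Int) (h : xs ≠ []) :
    intSeq (xs ++ [x]) =
      (xs.prod, x) :: (intSeq xs).flatMap (fun p => [(p.1 * x, p.2), (p.1, p.2 * x)]) ++ [(x, xs.prod)] := by
  have hs := gseq_snoc xs x
  rw [gseq_decomp xs h] at hs
  simp only [List.flatMap_cons, List.flatMap_append, List.flatMap_cons, List.flatMap_nil] at hs
  rw [intSeq, hs]
  simp only [one_mul, List.drop_one, List.tail_cons, List.cons_append, List.nil_append]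
  rw [show ((xs.prod, x) :: ((intSeq xs).flatMap (fun p => [(p.1 * x, p.2), (p.1, p.2 * x)]) ++ ((x, xs.prod) :: [(1, xs.prod * x)]))) = ((xs.prod, x) :: ((intSeq xs).flatMap (fun p => [(p.1 * x, p.2), (p.1, p.2 * x)]) ++ [(x, xs.prod)]) ++ [(1, xs.prod * x)]) by simp]
  rw [List.dropLast_concat]

theorem update_eq_self_of_subset {α : Type} [BEq α] [LawfulBEq α] (l : List α) :
    ∀ s : PySem.Set α, (∀ y ∈ l, y ∈ s) → PySem.Set.update s l = s := by
  induction l with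
  | nil => intro s _; simp [PySem.Set.update]
  | cons x t ih =>
    intro s hs
    rw [PySem.Set.update_cons, PySem.Set.add_of_mem (hs x (by simp))]
    exact ih s (fun y hy => hs y (by simp [hy]))

theorem update_flatMap_ofList {α β : Type} [BEq α] [LawfulBEq α] [BEq β] [LawfulBEq β]
    (f : α → List β) (L : List α) (s : PySem.Set β) :
    PySem.Set.update s ((PySem.Set.ofList L).flatMap f) = PySem.Set.update s (L.flatMap f) := by
  induction L using List.reverseRecOn generalizing s with
  | nil => rfl
  | append_singleton t x ih =>
    rw [PySem.Set.ofList_append_singleton]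
    by_cases hx : x ∈ PySem.Set.ofList t
    · rw [PySem.Set.add_of_mem hx, ih,
        List.flatMap_append, PySem.Set.update_append]
      have hsub : ∀ y ∈ [x].flatMap f, y ∈ PySem.Set.update s (t.flatMap f) := by
        intro y hy
        simp only [List.flatMap_cons, List.flatMap_nil, List.append_nil] at hy
        apply (PySem.Set.mem_update _ _ _).mpr
        right
        exact List.mem_flatMap.mpr ⟨x, (PySem.Set.mem_ofList _ _).mp hx, hy⟩
      rw [update_eq_self_of_subset _ _ hsub]
    · rw [PySem.Set.add_of_not_mem hx]
      rw [List.flatMap_append, List.flatMap_append, PySem.Set.update_append,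
        PySem.Set.update_append, ih]

theorem ofList_map_ofList {α β : Type} [BEq α] [LawfulBEq α] [BEq β] [LawfulBEq β]
    (g : α → β) (L : List α) :
    PySem.Set.ofList ((PySem.Set.ofList L).map g) = PySem.Set.ofList (L.map g) := by
  have h1 : ∀ M : List α, M.map g = M.flatMap (fun a => [g a]) := by
    intro M; induction M with
    | nil => rfl
    | cons a t ih => simp [ih]
  rw [h1, h1, ← PySem.Set.update_nil_left (((PySem.Set.ofList L).flatMap (fun a => [g a]))),
    update_flatMap_ofList, PySem.Set.update_nil_left]

theorem A_fold_no_skip (pf : List Int) (l : List (List Bool))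
    (hl : ∀ v ∈ l, v.all id = false ∧ v.any id = true) :
    ∀ s : PySem.Set (Int × Int),
      l.foldl (fun factors bools =>
        if bools.all id || !(bools.any id) then factors
        else
          let f0 := pyReduceMul (pyCompress pf bools)
          let not_bools := bools.map (fun x => !x)
          let f1 := pyReduceMul (pyCompress pf not_bools)
          PySem.Set.add factors (min f0 f1, max f0 f1)) s
      = PySem.Set.update s (l.map (fun v =>
          (min (pyReduceMul (pyCompress pf v)) (pyReduceMul (pyCompress pf (v.map (fun x => !x)))),
           max (pyReduceMul (pyCompress pf v)) (pyReduceMul (pyCompress pf (v.map (fun x => !x))))))) := by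
  induction l with
  | nil => intro s; rfl
  | cons v t ih =>
    intro s
    have h1 := (hl v (by simp)).1
    have h2 := (hl v (by simp)).2
    rw [List.foldl_cons, List.map_cons, PySem.Set.update_cons, if_neg (by simp [h1, h2])]
    exact ih (fun w hw => hl w (by simp [hw])) _

theorem A_char (pf : List Int) (h : 1 ≤ pf.length) :
    all_two_factors pf =
      PySem.Set.ofList ((intSeq pf).map (fun p => (min p.1 p.2, max p.1 p.2))) := by
  obtain ⟨n, hn⟩ : ∃ n, pf.length = n + 1 := ⟨pf.length - 1, by omega⟩
  have hmids : (mids (n + 1)).map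
      (fun v => ((pyCompress pf v).prod, (pyCompress pf (v.map (fun b => !b))).prod)) = intSeq pf := by
    have e := map_pairProd_boolVecs pf
    rw [hn, boolVecs_decomp] at e
    rw [intSeq, ← e]
    simp
  unfold all_two_factors
  rw [hn, boolVecs_decomp]
  simp only [List.foldl_cons, List.foldl_append, List.foldl_nil]
  rw [if_pos (by simp), A_fold_no_skip pf _ (mids_no_skip (n + 1)), if_pos (by simp)]
  rw [PySem.Set.update_nil_left, ← hmids, List.map_map]
  exact congrArg PySem.Set.ofList
    (List.map_congr_left (fun v _ => by simp [Function.comp, pyReduceMul_eq_prod]))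

theorem ofList_cons_flatMap {α β : Type} [BEq α] [LawfulBEq α] [BEq β] [LawfulBEq β]
    (f : α → List β) (I : List α) (c d : β) :
    PySem.Set.ofList (c :: (PySem.Set.ofList I).flatMap f ++ [d]) =
      PySem.Set.ofList (c :: I.flatMap f ++ [d]) := by
  have h : ∀ M : List β, PySem.Set.ofList (c :: M ++ [d])
      = PySem.Set.add (PySem.Set.update (PySem.Set.ofList [c]) M) d := by
    intro M
    rw [show c :: M ++ [d] = (([c] ++ M) ++ [d]) by simp, PySem.Set.ofList_append_singleton,
      PySem.Set.ofList_append]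
  rw [h, h, update_flatMap_ofList]

theorem B_loop (rest : List Int) (x0 : Int) :
    rest.foldl twoFactorStep ([], x0) = (PySem.Set.ofList (intSeq (x0 :: rest)), (x0 :: rest).prod) := by
  induction rest using List.reverseRecOn with
  | nil => simp [intSeq, gseq]
  | append_singleton t x ih =>
    rw [List.foldl_append, ih, List.foldl_cons, List.foldl_nil, twoFactorStep]
    have h2 : intSeq (x0 :: (t ++ [x])) =
        ((x0 :: t).prod, x) :: (intSeq (x0 :: t)).flatMap (fun p => [(p.1 * x, p.2), (p.1, p.2 * x)])
          ++ [(x, (x0 :: t).prod)] :=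
      intSeq_snoc (x0 :: t) x (by simp)
    have h3 : (x0 :: (t ++ [x])).prod = (x0 :: t).prod * x := by
      rw [show x0 :: (t ++ [x]) = (x0 :: t) ++ [x] from rfl, List.prod_append]
      simp
    refine Prod.ext ?_ ?_
    · show PySem.Set.ofList _ = _
      rw [h2]
      exact ofList_cons_flatMap _ _ _ _
    · exact h3.symm

-- ===== VERDICT (by name: the statement is the Claim_ definition above) =====
theorem all_two_factors_spec : Claim_equal_all_two_factors := by
  intro pf _ hpre
  unfold Spec_all_two_factors
  match pf with
  | [] => simp [Pre_all_two_factors] at hpre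
  | x0 :: rest =>
    rw [A_char (x0 :: rest) (by simp), all_two_factors_alt]
    simp only [B_loop]
    exact (ofList_map_ofList _ _).symm
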